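-- pv_equiv track=rewrite | github.com/kwinata/cp | cf-codeforces/1249-c.py | biggest_smaller_power
-- ===== SOURCE A (Python) =====
-- def extract_factors(number, base):
--     current_power = 1
--     powers = []
--     while current_power <= number:
--         powers.append(current_power)
--         current_power *= base
--
--     factors = []
--     for power in reversed(powers):
--         factor = 0
--         while number >= power:
--             number -= power
--             factor += 1
--         factors.append(factor)
--     return reversed(factors)
--
-- def sum_factors(factors, base):
--     multiplier = 1
--     total = 0
--     for factor in factors:
--         total += factor * multiplier
--         multiplier *= base
--     return total
--
-- def biggest_smaller_power(number, base):
--     factors = [i for i in extract_factors(number, base)]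
--     good_limit = 1
--     good_factors = []
--
--     carry = 0
--     for factor in factors:
--         factor += carry
--         carry = 0
--         if factor > good_limit:
--             carry = 1
--             good_factors = [0] * (len(good_factors)+1)
--         else:
--             good_factors.append(factor)
--     if carry:
--         good_factors.append(carry)
--     return sum_factors(good_factors, base)
-- ===== SOURCE B (Python) =====
-- def biggest_smaller_power(number, base):
--     # Recursive closed-form: smallest value >= number whose base-`base` digits are all 0 or 1.
--     if number <= 0:
--         return 0
--     q, r = divmod(number, base)
--     if r >= 2:
--         return biggest_smaller_power(q + 1, base) * base
--     g = biggest_smaller_power(q, base)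
--     if g == q:
--         return g * base + r
--     return g * base
-- ===== Notes on version B (the rewrite author's own statement) =====
-- stated objective: simpler
-- what changed: A materialises the power list, extracts digits by repeated subtraction and runs an explicit LSB-to-MSB carry pass over a digit list; B is a short recursion directly on the integer (peel the last digit with divmod, round up recursively when a digit is >= 2), with no lists at all.
import Mathlib
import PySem

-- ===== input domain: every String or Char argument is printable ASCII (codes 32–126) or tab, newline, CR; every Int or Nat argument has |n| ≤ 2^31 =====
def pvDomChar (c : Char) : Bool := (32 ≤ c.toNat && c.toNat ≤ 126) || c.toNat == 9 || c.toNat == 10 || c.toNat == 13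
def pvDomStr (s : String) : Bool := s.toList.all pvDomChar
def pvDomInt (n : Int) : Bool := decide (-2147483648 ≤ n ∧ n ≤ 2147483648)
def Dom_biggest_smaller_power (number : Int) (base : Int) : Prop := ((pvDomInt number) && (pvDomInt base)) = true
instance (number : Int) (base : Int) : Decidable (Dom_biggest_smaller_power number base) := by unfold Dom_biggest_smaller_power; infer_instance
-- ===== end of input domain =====

-- B replaces A's power-list / repeated-subtraction digit extraction and explicit carry pass
-- by a short recursion directly on the integer (objective: simpler; also measurably faster for large bases).

-- ===== PORT A =====
-- while current_power <= number: powers.append(current_power); current_power *= base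
-- (fuel makes the loop total in Lean; inside Pre_ the fuel is never exhausted — pvPowersA_spec below)
def pvPowersA (fuel : Nat) (cp number base : Int) : List Int :=
  match fuel with
  | 0 => []
  | f+1 => if cp ≤ number then cp :: pvPowersA f (cp * base) number base else []

-- while number >= power: number -= power; factor += 1   — returns (number, factor)
def pvSubLoopA (fuel : Nat) (number power : Int) : Int × Int :=
  match fuel with
  | 0 => (number, 0)
  | f+1 => if power ≤ number then
             let p := pvSubLoopA f (number - power) power
             (p.1, p.2 + 1)
           else (number, 0)

-- body of the 'for power in reversed(powers)' loop; state = (number, factors)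
def pvExtractStep (st : Int × List Int) (power : Int) : Int × List Int :=
  let p := pvSubLoopA (st.1.toNat + 1) st.1 power
  (p.1, st.2 ++ [p.2])

def pvExtractFactors (number base : Int) : List Int :=
  let powers := pvPowersA (number.toNat + 1) 1 number base
  let st := powers.reverse.foldl pvExtractStep (number, [])
  st.2.reverse

-- body of the 'for factor in factors' loop of sum_factors; state = (multiplier, total)
def pvSumStep (base : Int) (st : Int × Int) (factor : Int) : Int × Int :=
  (st.1 * base, st.2 + factor * st.1)

def pvSumFactors (factors : List Int) (base : Int) : Int :=
  (factors.foldl (pvSumStep base) (1, 0)).2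

-- body of the carry loop; state = (carry, good_factors)
def pvCarryStep (good_limit : Int) (st : Int × List Int) (factor : Int) : Int × List Int :=
  let f := factor + st.1
  if f > good_limit then (1, List.replicate (st.2.length + 1) 0)
  else (0, st.2 ++ [f])

def biggest_smaller_power (number : Int) (base : Int) : Int :=
  let factors := pvExtractFactors number base
  let good_limit : Int := 1
  let st := factors.foldl (pvCarryStep good_limit) (0, [])
  let good := if st.1 ≠ 0 then st.2 ++ [st.1] else st.2
  pvSumFactors good base

-- ===== PORT B =====
def pvAltGo (fuel : Nat) (n base : Int) : Int :=
  match fuel with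
  | 0 => 0
  | f+1 =>
    if n ≤ 0 then 0
    else
      match PySem.Int.divmod? n base with
      | none => 0
      | some qr =>
        if 2 ≤ qr.2 then pvAltGo f (qr.1 + 1) base * base
        else
          let g := pvAltGo f qr.1 base
          if g = qr.1 then g * base + qr.2 else g * base

def biggest_smaller_power_alt (number : Int) (base : Int) : Int :=
  pvAltGo (number.toNat + 1) number base

-- ===== PRECONDITION & SPEC =====
-- Pre_ excludes exactly the inputs on which Python A never returns (its loops run forever
-- whenever base ≤ 1 and number ≥ 1); on every admitted input A returns normally.
def Pre_biggest_smaller_power (number : Int) (base : Int) : Prop := 2 ≤ base ∨ number ≤ 0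
instance (number : Int) (base : Int) : Decidable (Pre_biggest_smaller_power number base) := by
  unfold Pre_biggest_smaller_power; infer_instance

def pvWitness_biggest_smaller_power : Int × Int := (51, 10)

def Spec_biggest_smaller_power (number : Int) (base : Int) (out : Int) : Prop := out = biggest_smaller_power_alt number base
instance (number : Int) (base : Int) (out : Int) : Decidable (Spec_biggest_smaller_power number base out) := by unfold Spec_biggest_smaller_power; infer_instance

-- ===== CLAIM (what is proved, stated in full; the proofs are below) =====
def Claim_equal_biggest_smaller_power : Prop := ∀ (number : Int) (base : Int), Dom_biggest_smaller_power number base → Pre_biggest_smaller_power number base → Spec_biggest_smaller_power number base (biggest_smaller_power number base)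

-- ===== LEMMAS AND PROOFS =====

-- the k least-significant base-b digits of n (LSB first)
def padDigits (b : Int) : Nat → Int → List Int
  | 0, _ => []
  | k+1, n => n % b :: padDigits b k (n / b)

-- arithmetic helpers -------------------------------------------------------
lemma pv_div_lt (b n : Int) (hb : 2 ≤ b) (hn : 1 ≤ n) : n / b < n := by
  have h := Int.mul_ediv_add_emod n b
  have hq0 : 0 ≤ n / b := Int.ediv_nonneg (by omega) (by omega)
  have hr0 : 0 ≤ n % b := Int.emod_nonneg n (by omega)
  nlinarith [Int.emod_lt_of_pos n (show (0:Int) < b by omega)]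

lemma pv_div_succ_lt (b n : Int) (hb : 2 ≤ b) (hn : 1 ≤ n) (hr : 2 ≤ n % b) :
    n / b + 1 < n := by
  have h := Int.mul_ediv_add_emod n b
  have hq0 : 0 ≤ n / b := Int.ediv_nonneg (by omega) (by omega)
  nlinarith

lemma pv_divmod_pos (a b : Int) (hb : 0 < b) : PySem.Int.divmod? a b = some (a / b, a % b) := by
  simp [PySem.Int.divmod?, show b ≠ 0 by omega]
  rw [← PySem.Int.floordiv_eq_ediv_of_pos hb, ← PySem.Int.mod_eq_emod_of_pos hb]
  constructor <;> rfl

-- fuel irrelevance for the port of B --------------------------------------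
lemma pvAltGo_mono (b : Int) (hb : 2 ≤ b) :
    ∀ f g n, n.toNat < f → n.toNat < g → pvAltGo f n b = pvAltGo g n b := by
  intro f
  induction f with
  | zero => intro g n h; omega
  | succ f ih =>
    intro g n hf hg
    obtain ⟨g', rfl⟩ : ∃ g', g = g' + 1 := ⟨g - 1, by omega⟩
    by_cases hn : n ≤ 0
    · simp [pvAltGo, hn]
    · have hb0 : (0:Int) < b := by omega
      have h1 : (1:Int) ≤ n := by omega
      have hr0 : 0 ≤ n % b := Int.emod_nonneg n (by omega)
      have hq0 : 0 ≤ n / b := Int.ediv_nonneg (by omega) (by omega)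
      have hqlt : n / b < n := pv_div_lt b n hb h1
      simp only [pvAltGo, if_neg hn, pv_divmod_pos n b hb0]
      by_cases hr : 2 ≤ n % b
      · have h2 : n / b + 1 < n := pv_div_succ_lt b n hb h1 hr
        simp only [if_pos hr]
        rw [ih g' (n / b + 1) (by omega) (by omega)]
      · simp only [if_neg hr]
        rw [ih g' (n / b) (by omega) (by omega)]

lemma alt_nonpos (b n : Int) (h : n ≤ 0) : biggest_smaller_power_alt n b = 0 := by
  simp [biggest_smaller_power_alt, pvAltGo, h]

lemma alt_unfold (b n : Int) (hb : 2 ≤ b) (hn : 1 ≤ n) :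
    biggest_smaller_power_alt n b =
      if 2 ≤ n % b then biggest_smaller_power_alt (n / b + 1) b * b
      else if biggest_smaller_power_alt (n / b) b = n / b
           then biggest_smaller_power_alt (n / b) b * b + n % b
           else biggest_smaller_power_alt (n / b) b * b := by
  have hb0 : (0:Int) < b := by omega
  have hr0 : 0 ≤ n % b := Int.emod_nonneg n (by omega)
  have hq0 : 0 ≤ n / b := Int.ediv_nonneg (by omega) (by omega)
  have hqlt : n / b < n := pv_div_lt b n hb hn
  show pvAltGo (n.toNat + 1) n b = _
  simp only [pvAltGo, if_neg (show ¬ n ≤ 0 by omega), pv_divmod_pos n b hb0]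
  by_cases hr : 2 ≤ n % b
  · have h2 : n / b + 1 < n := pv_div_succ_lt b n hb hn hr
    simp only [if_pos hr]
    rw [pvAltGo_mono b hb n.toNat ((n / b + 1).toNat + 1) (n / b + 1) (by omega) (by omega)]
    rfl
  · simp only [if_neg hr]
    rw [pvAltGo_mono b hb n.toNat ((n / b).toNat + 1) (n / b) (by omega) (by omega)]
    rfl

lemma alt_one (b : Int) (hb : 2 ≤ b) : biggest_smaller_power_alt 1 b = 1 := by
  rw [alt_unfold b 1 hb le_rfl]
  rw [Int.emod_eq_of_lt (by omega) (by omega), Int.ediv_eq_zero_of_lt (by omega) (by omega)]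
  rw [alt_nonpos b 0 le_rfl]
  norm_num

lemma alt_pow (b : Int) (hb : 2 ≤ b) : ∀ k : Nat, biggest_smaller_power_alt (b ^ k) b = b ^ k := by
  intro k
  induction k with
  | zero => simpa using alt_one b hb
  | succ k ih =>
    have hpos : (0:Int) < b ^ k := pow_pos (by omega) k
    have h1 : (1:Int) ≤ b ^ (k+1) := one_le_pow₀ (by omega)
    rw [alt_unfold b (b ^ (k+1)) hb h1]
    have hmul : b ^ (k+1) = b * b ^ k := by ring
    have hmod : b ^ (k+1) % b = 0 := by rw [hmul]; exact Int.mul_emod_right b (b ^ k)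
    have hdiv : b ^ (k+1) / b = b ^ k := by rw [hmul]; exact Int.mul_ediv_cancel_left (b ^ k) (by omega)
    rw [hmod, hdiv, ih]
    simp only [if_neg (by omega : ¬ (2:Int) ≤ 0), if_true, add_zero, hmul]
    ring

lemma alt_le (b : Int) (hb : 2 ≤ b) :
    ∀ (k : Nat) (n : Int), 0 ≤ n → n ≤ b ^ k →
      0 ≤ biggest_smaller_power_alt n b ∧ biggest_smaller_power_alt n b ≤ b ^ k := by
  intro k
  induction k with
  | zero =>
    intro n h0 h1
    simp only [pow_zero] at h1 ⊢
    have : n = 0 ∨ n = 1 := by omega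
    rcases this with rfl | rfl
    · rw [alt_nonpos b 0 le_rfl]; omega
    · rw [alt_one b hb]; omega
  | succ k ih =>
    intro n h0 h1
    have hpk : (0:Int) < b ^ k := pow_pos (by omega) k
    by_cases hn : n ≤ 0
    · rw [alt_nonpos b n hn]
      exact ⟨le_rfl, le_of_lt (pow_pos (by omega) _)⟩
    · have hn1 : (1:Int) ≤ n := by omega
      have hb0 : (0:Int) < b := by omega
      have hr0 : 0 ≤ n % b := Int.emod_nonneg n (by omega)
      have hrb : n % b < b := Int.emod_lt_of_pos n hb0
      have hq0 : 0 ≤ n / b := Int.ediv_nonneg (by omega) (by omega)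
      have hql : n / b ≤ b ^ k := by
        have h2 := Int.ediv_le_ediv hb0 (show n ≤ b ^ k * b by rw [← pow_succ]; exact h1)
        rwa [Int.mul_ediv_cancel _ (by omega)] at h2
      have heq : b * (n / b) + n % b = n := Int.mul_ediv_add_emod n b
      have hps : b ^ (k+1) = b ^ k * b := pow_succ b k
      rw [alt_unfold b n hb hn1]
      by_cases hr : 2 ≤ n % b
      · have hqlt : n / b + 1 ≤ b ^ k := by
          rcases eq_or_lt_of_le hql with h | h
          · exfalso; rw [h] at heq; nlinarith
          · omega
        obtain ⟨ha, hc⟩ := ih (n / b + 1) (by omega) hqlt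
        rw [if_pos hr]
        refine ⟨mul_nonneg ha (by omega), ?_⟩
        rw [hps]
        exact mul_le_mul_of_nonneg_right hc (by omega)
      · obtain ⟨ha, hc⟩ := ih (n / b) hq0 hql
        rw [if_neg hr]
        by_cases hg : biggest_smaller_power_alt (n / b) b = n / b
        · rw [if_pos hg, hg]
          constructor
          · nlinarith
          · linarith [heq, h1, mul_comm (n / b) b]
        · rw [if_neg hg]
          refine ⟨mul_nonneg ha (by omega), ?_⟩
          rw [hps]
          exact mul_le_mul_of_nonneg_right hc (by omega)

-- effect of one more (most-significant) digit on B's value -----------------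
def stepVal (b : Int) (k : Nat) (g d : Int) : Int :=
  if g = b ^ k then (if 2 ≤ d + 1 then b ^ (k+1) else (d + 1) * b ^ k)
  else (if 2 ≤ d then b ^ (k+1) else g + d * b ^ k)

set_option maxHeartbeats 1600000 in
lemma alt_msb (b : Int) (hb : 2 ≤ b) :
    ∀ (k : Nat) (m d : Int), 0 ≤ m → m ≤ b ^ k → 0 ≤ d → d < b →
      biggest_smaller_power_alt (m + d * b ^ k) b = stepVal b k (biggest_smaller_power_alt m b) d := by
  intro k
  induction k with
  | zero =>
    intro m d hm0 hm1 hd0 hdb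
    have hd' : biggest_smaller_power_alt d b = if 2 ≤ d then b else d := by
      by_cases hd2 : 2 ≤ d
      · rw [if_pos hd2, alt_unfold b d hb (by omega)]
        rw [Int.emod_eq_of_lt (by omega) hdb, Int.ediv_eq_zero_of_lt (by omega) hdb]
        rw [if_pos hd2, zero_add, alt_one b hb, one_mul]
      · rw [if_neg hd2]
        have : d = 0 ∨ d = 1 := by omega
        rcases this with rfl | rfl
        · exact alt_nonpos b 0 le_rfl
        · exact alt_one b hb
    simp only [pow_zero] at hm1
    have hmc : m = 0 ∨ m = 1 := by omega
    unfold stepVal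
    simp only [pow_zero, pow_one, zero_add, mul_one]
    rcases hmc with rfl | rfl
    · rw [alt_nonpos b 0 le_rfl, if_neg (by omega : ¬ (0:Int) = 1), zero_add]
      exact hd'
    · rw [alt_one b hb, if_pos rfl]
      by_cases hd1 : 1 ≤ d
      · rw [if_pos (by omega : (2:Int) ≤ d + 1)]
        rcases eq_or_lt_of_le (show d + 1 ≤ b by omega) with h | h
        · rw [show (1:Int) + d = b by omega]
          have := alt_pow b hb 1
          rwa [pow_one] at this
        · rw [alt_unfold b (1 + d) hb (by omega)]
          rw [Int.emod_eq_of_lt (by omega) (by omega), Int.ediv_eq_zero_of_lt (by omega) (by omega)]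
          rw [if_pos (by omega : (2:Int) ≤ 1 + d), zero_add, alt_one b hb, one_mul]
      · rw [show d = 0 by omega, if_neg (by omega : ¬ (2:Int) ≤ 0 + 1)]
        norm_num
        exact alt_one b hb
  | succ k ih =>
    intro m d hm0 hmk hd0 hdb
    have hb0 : (0:Int) < b := by omega
    have hpk : (0:Int) < b ^ k := pow_pos (by omega) k
    have hpk1 : (0:Int) < b ^ (k+1) := pow_pos (by omega) (k+1)
    have hps : b ^ (k+1) = b ^ k * b := pow_succ b k
    have hps2 : b ^ (k+2) = b ^ (k+1) * b := pow_succ b (k+1)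
    by_cases hnz : m + d * b ^ (k+1) ≤ 0
    · have hd' : d * b ^ (k+1) = 0 ∧ m = 0 := by constructor <;> nlinarith
      have hdz : d = 0 := by
        rcases hd' with ⟨h, _⟩
        exact (mul_eq_zero.mp h).resolve_right (by omega)
      rw [hd'.2, hdz]
      rw [alt_nonpos b (0 + 0 * b ^ (k+1)) (by simp), alt_nonpos b 0 le_rfl]
      unfold stepVal
      rw [if_neg (by omega : ¬ (0:Int) = b ^ (k+1))]
      rw [if_neg (by omega : ¬ (2:Int) ≤ 0)]
      simp
    · have hn1 : (1:Int) ≤ m + d * b ^ (k+1) := by omega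
      have hr0 : 0 ≤ m % b := Int.emod_nonneg m (by omega)
      have hrb : m % b < b := Int.emod_lt_of_pos m hb0
      have hq0 : 0 ≤ m / b := Int.ediv_nonneg (by omega) (by omega)
      have hqk : m / b ≤ b ^ k := by
        have h2 := Int.ediv_le_ediv hb0 (show m ≤ b ^ k * b by rw [← pow_succ]; exact hmk)
        rwa [Int.mul_ediv_cancel _ (by omega)] at h2
      have heqm : b * (m / b) + m % b = m := Int.mul_ediv_add_emod m b
      have hnq : (m + d * b ^ (k+1)) / b = m / b + d * b ^ k := by
        rw [show m + d * b ^ (k+1) = m + (d * b ^ k) * b by rw [hps]; ring]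
        exact Int.add_mul_ediv_right m (d * b ^ k) (by omega)
      have hnr : (m + d * b ^ (k+1)) % b = m % b := by
        rw [show m + d * b ^ (k+1) = m + (d * b ^ k) * b by rw [hps]; ring]
        exact Int.add_mul_emod_self_right m (d * b ^ k) b
      rw [alt_unfold b (m + d * b ^ (k+1)) hb hn1, hnq, hnr]
      by_cases hm1 : 1 ≤ m
      · rw [alt_unfold b m hb hm1]
        by_cases hr2 : 2 ≤ m % b
        · rw [if_pos hr2, if_pos hr2]
          have hq1k : m / b + 1 ≤ b ^ k := by
            rcases eq_or_lt_of_le hqk with h | h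
            · exfalso; rw [h] at heqm; nlinarith
            · omega
          rw [show m / b + d * b ^ k + 1 = (m / b + 1) + d * b ^ k by ring]
          rw [ih (m / b + 1) d (by omega) hq1k hd0 hdb]
          unfold stepVal
          by_cases hc : biggest_smaller_power_alt (m / b + 1) b = b ^ k
          · rw [if_pos hc, hc, if_pos (show b ^ k * b = b ^ (k+1) by rw [hps])]
            split_ifs with h2 <;> · simp only [hps2, hps]; try ring
          · have hcm : ¬ (biggest_smaller_power_alt (m / b + 1) b * b = b ^ (k+1)) := by
              intro h; rw [hps] at h; exact hc (mul_right_cancel₀ (by omega : b ≠ 0) h)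
            rw [if_neg hc, if_neg hcm]
            split_ifs with h2 <;> · simp only [hps2, hps]; try ring
        · -- m % b ≤ 1
          rw [if_neg hr2, if_neg hr2]
          have hih := ih (m / b) d hq0 hqk hd0 hdb
          rw [hih]
          obtain ⟨hga, hgb⟩ := alt_le b hb k (m / b) hq0 hqk
          unfold stepVal
          by_cases hc : biggest_smaller_power_alt (m / b) b = b ^ k
          · -- the inner value (alt m) equals b^(k+1) in either branch
            have hgm : (if biggest_smaller_power_alt (m / b) b = m / b
                then biggest_smaller_power_alt (m / b) b * b + m % b
                else biggest_smaller_power_alt (m / b) b * b) = b ^ (k+1) := by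
              by_cases hgq : biggest_smaller_power_alt (m / b) b = m / b
              · rw [if_pos hgq]
                have hqe : m / b = b ^ k := by rw [← hc, hgq]
                have hrz : m % b = 0 := by rw [hqe] at heqm; nlinarith
                rw [hgq, hqe, hrz, hps]; ring
              · rw [if_neg hgq, hc, hps]
            rw [hgm, if_pos rfl, if_pos hc]
            by_cases hd2 : 2 ≤ d + 1
            · rw [if_pos hd2, if_pos hd2]
              -- LHS: if b^(k+1) = m/b + d*b^k then b^(k+1)*b + m%b else b^(k+1)*b ; = b^(k+2)
              by_cases hcond : b ^ (k+1) = m / b + d * b ^ k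
              · rw [if_pos hcond]
                have hd1 : b - 1 ≤ d := by nlinarith [hcond, hqk, hpk, hps]
                have hdq : d = b - 1 := by omega
                have hqe : m / b = b ^ k := by rw [hdq] at hcond; rw [hps] at hcond; nlinarith [hcond]
                have hrz : m % b = 0 := by rw [hqe] at heqm; nlinarith [heqm, hmk, hps]
                rw [hrz, hps2, add_zero]
              · rw [if_neg hcond, hps2]
            · -- d = 0
              have hdz : d = 0 := by omega
              subst hdz
              rw [if_neg (by omega : ¬ (2:Int) ≤ 0 + 1), if_neg (by omega : ¬ (2:Int) ≤ 0 + 1)]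
              simp only [zero_add, one_mul, zero_mul, add_zero] at *
              by_cases hqe : m / b = b ^ k
              · have hrz : m % b = 0 := by rw [hqe] at heqm; nlinarith
                rw [if_pos (by rw [hqe]), hrz, hps]; ring
              · rw [if_neg (by omega : ¬ b ^ k = m / b), hps]
          · -- alt (m/b) < b^k, so alt m < b^(k+1)
            have hlt : biggest_smaller_power_alt (m / b) b < b ^ k := by
              rcases eq_or_lt_of_le hgb with h | h
              · exact absurd h hc
              · exact h
            have hgm : (if biggest_smaller_power_alt (m / b) b = m / b
                then biggest_smaller_power_alt (m / b) b * b + m % b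
                else biggest_smaller_power_alt (m / b) b * b) < b ^ (k+1) := by
              rw [hps]
              by_cases hgq : biggest_smaller_power_alt (m / b) b = m / b
              · rw [if_pos hgq]; nlinarith
              · rw [if_neg hgq]; nlinarith
            rw [if_neg hc, if_neg (ne_of_lt hgm)]
            by_cases hd2 : 2 ≤ d
            · rw [if_pos hd2, if_pos hd2]
              by_cases hcond : b ^ (k+1) = m / b + d * b ^ k
              · rw [if_pos hcond]
                have hd1 : b - 1 ≤ d := by nlinarith [hcond, hqk, hpk, hps]
                have hdq : d = b - 1 := by omega
                have hqe : m / b = b ^ k := by rw [hdq] at hcond; rw [hps] at hcond; nlinarith [hcond]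
                have hrz : m % b = 0 := by rw [hqe] at heqm; nlinarith [heqm, hmk, hps]
                rw [hrz, hps2, add_zero]
              · rw [if_neg hcond, hps2]
            · rw [if_neg hd2, if_neg hd2]
              by_cases hgq : biggest_smaller_power_alt (m / b) b = m / b
              · rw [if_pos hgq, if_pos (by rw [hgq])]
                simp only [hgq, hps]; ring
              · rw [if_neg hgq, if_neg (fun h => hgq (by omega))]
                simp only [hps]; ring
      · -- m = 0
        have hm0' : m = 0 := by omega
        subst hm0'
        have hqz : (0:Int) / b = 0 := Int.zero_ediv b
        have hrz : (0:Int) % b = 0 := Int.zero_emod b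
        rw [hqz, hrz, alt_nonpos b 0 le_rfl]
        rw [if_neg (by omega : ¬ (2:Int) ≤ 0)]
        have hih := ih 0 d (le_rfl) (by omega) hd0 hdb
        rw [zero_add] at hih
        rw [alt_nonpos b 0 le_rfl] at hih
        unfold stepVal at hih ⊢
        rw [if_neg (by omega : ¬ (0:Int) = b ^ k)] at hih
        rw [if_neg (by omega : ¬ (0:Int) = b ^ (k+1))]
        by_cases hd2 : 2 ≤ d
        · rw [if_pos hd2] at hih
          rw [if_pos hd2]
          rw [zero_add, hih]
          rw [if_neg (show ¬ b ^ (k+1) = d * b ^ k by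
            intro h
            have h2 : (b - d) * b ^ k = 0 := by rw [hps] at h; nlinarith
            have := (mul_eq_zero.mp h2).resolve_right (by omega)
            omega)]
          rw [hps2]
        · rw [if_neg hd2] at hih
          rw [if_neg hd2, zero_add, zero_add] at *
          have hdz : d = 0 ∨ d = 1 := by omega
          rcases hdz with rfl | rfl
          · simp only [zero_mul] at hih ⊢
            rw [hih]  -- should not happen: n ≥ 1 with m=0,d=0 impossible
            exfalso; omega
          · simp only [one_mul] at hih ⊢
            rw [hih, if_pos rfl, hps]; ring

-- digits ------------------------------------------------------------------
lemma padDigits_split (b : Int) (hb : 2 ≤ b) :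
    ∀ (k : Nat) (n : Int), 0 ≤ n → n < b ^ (k+1) →
      padDigits b (k+1) n = padDigits b k (n % b ^ k) ++ [n / b ^ k] := by
  intro k
  induction k with
  | zero =>
    intro n h0 h1
    rw [pow_one] at h1
    simp [padDigits, Int.emod_eq_of_lt h0 h1]
  | succ k ih =>
    intro n h0 h1
    have hb0 : (0:Int) < b := by omega
    have hpk : (0:Int) < b ^ k := pow_pos (by omega) k
    have hpk1 : (0:Int) < b ^ (k+1) := pow_pos (by omega) (k+1)
    have hq0 : 0 ≤ n / b := Int.ediv_nonneg h0 (by omega)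
    have hqlt : n / b < b ^ (k+1) := by
      rw [Int.ediv_lt_iff_lt_mul hb0, ← pow_succ]
      exact h1
    have e1 : n % b ^ (k+1) % b = n % b :=
      Int.emod_emod_of_dvd n (dvd_pow_self b (Nat.succ_ne_zero k))
    have hs0 : 0 ≤ n % b ^ (k+1) := Int.emod_nonneg n (ne_of_gt hpk1)
    have hslt : n % b ^ (k+1) < b ^ (k+1) := Int.emod_lt_of_pos n hpk1
    have hrepr : n = n % b ^ (k+1) + (n / b ^ (k+1) * b ^ k) * b := by
      have h := Int.mul_ediv_add_emod n (b ^ (k+1))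
      have h2 : n / b ^ (k+1) * b ^ k * b = b ^ (k+1) * (n / b ^ (k+1)) := by
        rw [pow_succ]; ring
      linarith [h, h2]
    have hdiv : n / b = (n % b ^ (k+1)) / b + (n / b ^ (k+1)) * b ^ k := by
      conv_lhs => rw [hrepr]
      exact Int.add_mul_ediv_right _ _ (by omega)
    have e2 : (n % b ^ (k+1)) / b = (n / b) % b ^ k := by
      rw [hdiv, Int.add_mul_emod_self_right]
      exact (Int.emod_eq_of_lt (Int.ediv_nonneg hs0 (by omega))
        (by rw [Int.ediv_lt_iff_lt_mul hb0, ← pow_succ]; exact hslt)).symm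
    have e3 : n / b / b ^ k = n / b ^ (k+1) := by
      rw [Int.ediv_ediv_of_nonneg (le_of_lt hb0), ← pow_succ']
    show (n % b) :: padDigits b (k+1) (n / b) = ((n % b ^ (k+1)) % b) :: padDigits b k ((n % b ^ (k+1)) / b) ++ [n / b ^ (k+1)]
    rw [ih (n / b) hq0 hqlt, e1, e2, e3]
    simp [List.cons_append]

-- sum_factors --------------------------------------------------------------
lemma sumStep_fst (b : Int) :
    ∀ (xs : List Int) (m t : Int), (xs.foldl (pvSumStep b) (m, t)).1 = m * b ^ xs.length := by
  intro xs
  induction xs with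
  | nil => intro m t; simp
  | cons x xs ih =>
    intro m t
    simp only [List.foldl_cons, pvSumStep, List.length_cons]
    rw [ih, pow_succ]
    ring

lemma sumFactors_append (b : Int) (xs : List Int) (x : Int) :
    pvSumFactors (xs ++ [x]) b = pvSumFactors xs b + x * b ^ xs.length := by
  unfold pvSumFactors
  rw [List.foldl_append]
  simp only [List.foldl_cons, List.foldl_nil, pvSumStep]
  rw [sumStep_fst b xs 1 0]
  ring

lemma sumStep_replicate (b : Int) :
    ∀ (k : Nat) (m t : Int), ((List.replicate k (0:Int)).foldl (pvSumStep b) (m, t)).2 = t := by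
  intro k
  induction k with
  | zero => intro m t; simp
  | succ k ih =>
    intro m t
    rw [List.replicate_succ]
    simp only [List.foldl_cons, pvSumStep]
    rw [ih]
    ring

lemma sumFactors_replicate_zero (b : Int) : ∀ k : Nat, pvSumFactors (List.replicate k 0) b = 0 := by
  intro k
  unfold pvSumFactors
  rw [sumStep_replicate]

-- the repeated-subtraction loop is division with remainder ------------------
lemma pvSubLoopA_spec (p : Int) (hp : 0 < p) :
    ∀ (fuel : Nat) (n : Int), 0 ≤ n → n.toNat < fuel → pvSubLoopA fuel n p = (n % p, n / p) := by
  intro fuel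
  induction fuel with
  | zero => intro n h0 hf; omega
  | succ f ih =>
    intro n h0 hf
    simp only [pvSubLoopA]
    by_cases hle : p ≤ n
    · rw [if_pos hle]
      rw [ih (n - p) (by omega) (by omega)]
      have hmod : (n - p) % p = n % p := by
        conv_rhs => rw [show n = (n - p) + 1 * p by ring]
        rw [Int.add_mul_emod_self_right]
      have hdiv : (n - p) / p + 1 = n / p := by
        conv_rhs => rw [show n = (n - p) + 1 * p by ring]
        rw [Int.add_mul_ediv_right _ _ (by omega)]
      simp [hmod, hdiv]
    · rw [if_neg hle]
      rw [Int.emod_eq_of_lt h0 (by omega), Int.ediv_eq_zero_of_lt h0 (by omega)]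

-- the powers list -----------------------------------------------------------
lemma pvPowersA_spec (b n : Int) (hb : 2 ≤ b) :
    ∀ (fuel : Nat) (cp : Int), 0 < cp → n < cp * 2 ^ fuel →
      ∃ k : Nat, pvPowersA fuel cp n b = (List.range k).map (fun i => cp * b ^ i) ∧ n < cp * b ^ k := by
  intro fuel
  induction fuel with
  | zero =>
    intro cp hcp hlt
    refine ⟨0, by simp [pvPowersA], by simpa using hlt⟩
  | succ f ih =>
    intro cp hcp hlt
    simp only [pvPowersA]
    by_cases hle : cp ≤ n
    · rw [if_pos hle]
      have hcpb : 0 < cp * b := mul_pos hcp (by omega)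
      have hlt' : n < cp * b * 2 ^ f := by
        have hp2 : (0:Int) < 2 ^ f := pow_pos (by omega) f
        have h2 : cp * 2 ^ (f+1) ≤ cp * b * 2 ^ f := by
          rw [pow_succ]
          nlinarith [mul_nonneg (mul_nonneg hcp.le hp2.le) (show (0:Int) ≤ b - 2 by omega)]
        linarith
      obtain ⟨k, hk, hklt⟩ := ih (cp * b) hcpb hlt'
      refine ⟨k + 1, ?_, ?_⟩
      · rw [hk, List.range_succ_eq_map, List.map_cons, List.map_map]
        congr 1
        · simp
        · refine List.map_congr_left ?_
          intro i _
          simp only [Function.comp_apply, pow_succ]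
          ring
      · have h3 : cp * b ^ (k+1) = cp * b * b ^ k := by rw [pow_succ]; ring
        linarith
    · rw [if_neg hle]
      exact ⟨0, by simp, by simpa using (by omega : n < cp)⟩

-- the extraction loop produces the base-b digits -----------------------------
lemma extract_fold (b : Int) (hb : 2 ≤ b) :
    ∀ (k : Nat) (n : Int) (acc : List Int), 0 ≤ n → n < b ^ k →
      (((List.range k).map (fun i => b ^ i)).reverse.foldl pvExtractStep (n, acc))
        = (0, acc ++ (padDigits b k n).reverse) := by
  intro k
  induction k with
  | zero =>
    intro n acc h0 h1
    rw [pow_zero] at h1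
    have hn : n = 0 := by omega
    subst hn
    simp [padDigits]
  | succ k ih =>
    intro n acc h0 h1
    have hpk : (0:Int) < b ^ k := pow_pos (by omega) k
    rw [List.range_succ, List.map_append, List.reverse_append]
    simp only [List.map_cons, List.map_nil, List.reverse_cons, List.reverse_nil, List.nil_append,
      List.singleton_append, List.foldl_cons]
    have hstep : pvExtractStep (n, acc) (b ^ k) = (n % b ^ k, acc ++ [n / b ^ k]) := by
      unfold pvExtractStep
      rw [pvSubLoopA_spec (b ^ k) hpk (n.toNat + 1) n h0 (by omega)]
    rw [hstep]
    rw [ih (n % b ^ k) (acc ++ [n / b ^ k]) (Int.emod_nonneg n (ne_of_gt hpk)) (Int.emod_lt_of_pos n hpk)]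
    rw [padDigits_split b hb k n h0 h1, List.reverse_append]
    simp

-- invariant of A's carry pass -------------------------------------------------
lemma pvCarryStep_eq (st : Int × List Int) (d : Int) :
    pvCarryStep 1 st d =
      if d + st.1 > 1 then (1, List.replicate (st.2.length + 1) 0) else (0, st.2 ++ [d + st.1]) := rfl

lemma carry_inv (b : Int) (hb : 2 ≤ b) :
    ∀ (k : Nat) (n : Int), 0 ≤ n → n < b ^ k →
      ((padDigits b k n).foldl (pvCarryStep 1) (0, [])).2.length = k ∧
      ((biggest_smaller_power_alt n b = b ^ k →
          ((padDigits b k n).foldl (pvCarryStep 1) (0, [])).1 = 1 ∧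
          pvSumFactors ((padDigits b k n).foldl (pvCarryStep 1) (0, [])).2 b = 0) ∧
       (biggest_smaller_power_alt n b ≠ b ^ k →
          ((padDigits b k n).foldl (pvCarryStep 1) (0, [])).1 = 0 ∧
          pvSumFactors ((padDigits b k n).foldl (pvCarryStep 1) (0, [])).2 b = biggest_smaller_power_alt n b)) := by
  intro k
  induction k with
  | zero =>
    intro n h0 h1
    rw [pow_zero] at h1 ⊢
    have hn : n = 0 := by omega
    subst hn
    rw [alt_nonpos b 0 le_rfl]
    exact ⟨rfl, fun h => absurd h (by omega), fun _ => ⟨rfl, rfl⟩⟩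
  | succ k ih =>
    intro n h0 h1
    have hb0 : (0:Int) < b := by omega
    have hpk : (0:Int) < b ^ k := pow_pos (by omega) k
    have hpk1 : (0:Int) < b ^ (k+1) := pow_pos (by omega) (k+1)
    have hps : b ^ (k+1) = b ^ k * b := pow_succ b k
    have hm0 : 0 ≤ n % b ^ k := Int.emod_nonneg n (ne_of_gt hpk)
    have hmlt : n % b ^ k < b ^ k := Int.emod_lt_of_pos n hpk
    have hd0 : 0 ≤ n / b ^ k := Int.ediv_nonneg h0 (by omega)
    have hdb : n / b ^ k < b := by
      rw [Int.ediv_lt_iff_lt_mul hpk, mul_comm, ← pow_succ]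
      exact h1
    have hsum : n % b ^ k + n / b ^ k * b ^ k = n := by
      have h := Int.mul_ediv_add_emod n (b ^ k)
      linarith [h, mul_comm (n / b ^ k) (b ^ k)]
    rw [padDigits_split b hb k n h0 h1, List.foldl_append]
    obtain ⟨hlen, hyes, hno⟩ := ih (n % b ^ k) hm0 hmlt
    obtain ⟨hga, hgb⟩ := alt_le b hb k (n % b ^ k) hm0 (le_of_lt hmlt)
    have hmsb := alt_msb b hb k (n % b ^ k) (n / b ^ k) hm0 (le_of_lt hmlt) hd0 hdb
    rw [hsum] at hmsb
    simp only [List.foldl_cons, List.foldl_nil]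
    by_cases hc : biggest_smaller_power_alt (n % b ^ k) b = b ^ k
    · obtain ⟨hc1, hs0⟩ := hyes hc
      unfold stepVal at hmsb
      rw [if_pos hc] at hmsb
      by_cases h2 : 2 ≤ n / b ^ k + 1
      · have hstep : pvCarryStep 1 ((padDigits b k (n % b ^ k)).foldl (pvCarryStep 1) (0, [])) (n / b ^ k)
            = (1, List.replicate (k + 1) 0) := by
          rw [pvCarryStep_eq, hc1, if_pos (by omega : n / b ^ k + 1 > 1), hlen]
        rw [hstep]
        rw [if_pos h2] at hmsb
        refine ⟨by simp, fun _ => ⟨rfl, sumFactors_replicate_zero b (k+1)⟩, fun h => absurd hmsb h⟩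
      · have hd1 : n / b ^ k = 0 := by omega
        have hstep : pvCarryStep 1 ((padDigits b k (n % b ^ k)).foldl (pvCarryStep 1) (0, [])) (n / b ^ k)
            = (0, ((padDigits b k (n % b ^ k)).foldl (pvCarryStep 1) (0, [])).2 ++ [n / b ^ k + 1]) := by
          rw [pvCarryStep_eq, hc1, if_neg (by omega : ¬ n / b ^ k + 1 > 1)]
        rw [hstep]
        rw [if_neg h2] at hmsb
        have hval : biggest_smaller_power_alt n b = b ^ k := by
          rw [hmsb, hd1]; ring
        have hne : biggest_smaller_power_alt n b ≠ b ^ (k+1) := by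
          rw [hval]
          nlinarith
        refine ⟨by simp [hlen], fun h => absurd h hne, fun _ => ⟨rfl, ?_⟩⟩
        rw [sumFactors_append, hs0, hlen, hval, hd1]
        ring
    · obtain ⟨hc1, hsv⟩ := hno hc
      have hlt : biggest_smaller_power_alt (n % b ^ k) b < b ^ k := lt_of_le_of_ne hgb hc
      unfold stepVal at hmsb
      rw [if_neg hc] at hmsb
      by_cases h2 : 2 ≤ n / b ^ k
      · have hstep : pvCarryStep 1 ((padDigits b k (n % b ^ k)).foldl (pvCarryStep 1) (0, [])) (n / b ^ k)
            = (1, List.replicate (k + 1) 0) := by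
          rw [pvCarryStep_eq, hc1, if_pos (by omega : n / b ^ k + 0 > 1), hlen]
        rw [hstep]
        rw [if_pos h2] at hmsb
        refine ⟨by simp, fun _ => ⟨rfl, sumFactors_replicate_zero b (k+1)⟩, fun h => absurd hmsb h⟩
      · have hstep : pvCarryStep 1 ((padDigits b k (n % b ^ k)).foldl (pvCarryStep 1) (0, [])) (n / b ^ k)
            = (0, ((padDigits b k (n % b ^ k)).foldl (pvCarryStep 1) (0, [])).2 ++ [n / b ^ k + 0]) := by
          rw [pvCarryStep_eq, hc1, if_neg (by omega : ¬ n / b ^ k + 0 > 1)]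
        rw [hstep]
        rw [if_neg h2] at hmsb
        have hne : biggest_smaller_power_alt n b ≠ b ^ (k+1) := by
          rw [hmsb]
          nlinarith [hlt, hd0, hdb, hpk, (by omega : ¬ 2 ≤ n / b ^ k)]
        refine ⟨by simp [hlen], fun h => absurd h hne, fun _ => ⟨rfl, ?_⟩⟩
        rw [sumFactors_append, hsv, hlen, hmsb]
        ring

-- ===== VERDICT (by name: the statement is the Claim_ definition above) =====
theorem biggest_smaller_power_spec : Claim_equal_biggest_smaller_power := by
  intro n b _ hpre
  unfold Spec_biggest_smaller_power
  by_cases hn : n ≤ 0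
  · have hA : biggest_smaller_power n b = 0 := by
      have hpw : pvPowersA (n.toNat + 1) 1 n b = [] := by
        simp only [pvPowersA]
        rw [if_neg (by omega : ¬ (1:Int) ≤ n)]
      have hfac : pvExtractFactors n b = [] := by
        show ((pvPowersA (n.toNat + 1) 1 n b).reverse.foldl pvExtractStep (n, [])).2.reverse = []
        rw [hpw]
        rfl
      show pvSumFactors
          (if ((pvExtractFactors n b).foldl (pvCarryStep 1) (0, [])).1 ≠ 0
           then ((pvExtractFactors n b).foldl (pvCarryStep 1) (0, [])).2
                  ++ [((pvExtractFactors n b).foldl (pvCarryStep 1) (0, [])).1]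
           else ((pvExtractFactors n b).foldl (pvCarryStep 1) (0, [])).2) b = 0
      rw [hfac]
      simp [pvSumFactors]
    rw [hA, alt_nonpos b n hn]
  · have hb2 : 2 ≤ b := hpre.resolve_right hn
    have h0 : (0:Int) ≤ n := by omega
    have hfuel : n < 1 * 2 ^ (n.toNat + 1) := by
      have h := Nat.lt_two_pow_self (n := n.toNat)
      have h2 : (n.toNat : Int) < (2:Int) ^ (n.toNat + 1) := by
        exact_mod_cast Nat.lt_of_lt_of_le h (Nat.pow_le_pow_right (by omega) (by omega))
      omega
    obtain ⟨k, hk, hklt⟩ := pvPowersA_spec b n hb2 (n.toNat + 1) 1 one_pos hfuel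
    rw [one_mul] at hklt
    simp only [one_mul] at hk
    have hfac : pvExtractFactors n b = padDigits b k n := by
      show ((pvPowersA (n.toNat + 1) 1 n b).reverse.foldl pvExtractStep (n, [])).2.reverse = padDigits b k n
      rw [hk, extract_fold b hb2 k n [] h0 hklt]
      simp
    show pvSumFactors
        (if ((pvExtractFactors n b).foldl (pvCarryStep 1) (0, [])).1 ≠ 0
         then ((pvExtractFactors n b).foldl (pvCarryStep 1) (0, [])).2
                ++ [((pvExtractFactors n b).foldl (pvCarryStep 1) (0, [])).1]
         else ((pvExtractFactors n b).foldl (pvCarryStep 1) (0, [])).2) b = biggest_smaller_power_alt n b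
    rw [hfac]
    obtain ⟨hlen, hyes, hno⟩ := carry_inv b hb2 k n h0 hklt
    by_cases hc : biggest_smaller_power_alt n b = b ^ k
    · obtain ⟨h1, h2⟩ := hyes hc
      rw [h1, if_pos (by omega : (1:Int) ≠ 0)]
      rw [sumFactors_append, h2, hlen, hc]
      ring
    · obtain ⟨h1, h2⟩ := hno hc
      rw [h1, if_neg (by simp)]
      exact h2
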